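-- pv_equiv track=rewrite | github.com/dang-kevin/CSC108 | Social Networks/network_functions.py | get_friends_of_friends
-- ===== SOURCE A (Python) =====
-- from typing import List, Tuple, Dict, TextIO
--
-- def get_friends_of_friends(person_to_friends: Dict[str, List[str]], person: str) -> List[str]:
--     """
--     Return the list of names of people who are friends of the person's friends.
--
--     >>> p2f = {'Jay Pritchett': ['Claire Dunphy', 'Gloria Pritchett', 'Manny Delgado'], 'Claire Dunphy': \
--     ['Jay Pritchett', 'Mitchell Pritchett', 'Phil Dunphy'], 'Manny Delgado': ['Gloria Pritchett', 'Jay Pritchett', \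
--     'Luke Dunphy'], 'Mitchell Pritchett': ['Cameron Tucker', 'Claire Dunphy', 'Luke Dunphy'], 'Alex Dunphy': \
--     ['Luke Dunphy'], 'Cameron Tucker': ['Gloria Pritchett', 'Mitchell Pritchett'], 'Haley Gwendolyn Dunphy': \
--     ['Dylan D-Money', 'Gilbert D-Cat'], 'Phil Dunphy': ['Claire Dunphy', 'Luke Dunphy'], 'Dylan D-Money': \
--     ['Chairman D-Cat', 'Haley Gwendolyn Dunphy'], 'Gloria Pritchett': ['Cameron Tucker', 'Jay Pritchett', \
--     'Manny Delgado'], 'Luke Dunphy': ['Alex Dunphy', 'Manny Delgado', 'Mitchell Pritchett', 'Phil Dunphy']}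
--     >>> get_friends_of_friends(p2f, 'Jay Pritchett')
--     ['Cameron Tucker', 'Gloria Pritchett', 'Luke Dunphy', 'Manny Delgado', 'Mitchell Pritchett', 'Phil Dunphy']
--     >>> get_friends_of_friends(p2f, 'Claire Dunphy')
--     ['Cameron Tucker', 'Gloria Pritchett', 'Luke Dunphy', 'Luke Dunphy', 'Manny Delgado']
--     """
--     lst = []
--
--     for mutual in person_to_friends[person]:
--         for friend in person_to_friends[mutual]:
--             if friend != person:
--                 lst.append(friend)
--     lst.sort()
--     return lst
-- ===== SOURCE B (Python) =====
-- def get_friends_of_friends(person_to_friends, person):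
--     def merge(xs, ys):
--         out = []
--         while xs and ys:
--             if xs[0] <= ys[0]:
--                 out.append(xs[0])
--                 xs = xs[1:]
--             else:
--                 out.append(ys[0])
--                 ys = ys[1:]
--         return out + xs + ys
--
--     result = []
--     for mutual in person_to_friends[person]:
--         block = sorted(f for f in person_to_friends[mutual] if f != person)
--         result = merge(result, block)
--     return result
-- ===== Notes on version B (the rewrite author's own statement) =====
-- stated objective: alternative
-- what changed: B replaces collect-then-sort with a merge-based scheme: each mutual friend's list is filtered and sorted as a small block, and the blocks are combined with a two-pointer sorted merge, so no sort of the full duplicate-bearing list ever happens.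
import Mathlib
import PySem

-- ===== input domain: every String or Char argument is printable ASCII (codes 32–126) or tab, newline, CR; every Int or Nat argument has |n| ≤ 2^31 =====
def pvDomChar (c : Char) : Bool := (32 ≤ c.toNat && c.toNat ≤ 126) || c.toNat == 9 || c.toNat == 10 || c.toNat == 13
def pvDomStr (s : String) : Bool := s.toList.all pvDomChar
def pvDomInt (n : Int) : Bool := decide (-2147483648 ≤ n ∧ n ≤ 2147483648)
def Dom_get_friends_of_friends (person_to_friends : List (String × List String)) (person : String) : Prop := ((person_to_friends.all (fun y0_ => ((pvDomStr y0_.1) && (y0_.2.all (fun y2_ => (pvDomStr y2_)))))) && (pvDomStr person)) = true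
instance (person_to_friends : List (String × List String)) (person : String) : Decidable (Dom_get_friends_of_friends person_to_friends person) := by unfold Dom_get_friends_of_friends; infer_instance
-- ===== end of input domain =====

-- B merges per-mutual filtered-and-sorted blocks with a two-pointer merge instead of
-- collecting everything and sorting once (objective: alternative algorithm).

-- ===== PORT A =====
-- dict lookups d[k] are ported as Dict.getD … []; Pre_ guarantees the key is present (Python raises KeyError otherwise).
def get_friends_of_friends (person_to_friends : List (String × List String)) (person : String) : List String :=
  let d := PySem.Dict.mk person_to_friends
  let lst := (d.getD person []).foldl (fun lst mut_ =>
      (d.getD mut_ []).foldl (fun lst friend =>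
        if friend ≠ person then lst ++ [friend] else lst) lst) []
  PySem.List.sorted lst (fun x => x) false

-- ===== PORT B =====
-- B's two-pointer merge of two lists (the while loop consumes the heads; ported as the
-- obvious recursion over the same two lists).
def pvMerge : List String → List String → List String
  | [], ys => ys
  | x :: xs, [] => x :: xs
  | x :: xs, y :: ys =>
    if x ≤ y then x :: pvMerge xs (y :: ys) else y :: pvMerge (x :: xs) ys
termination_by xs ys => xs.length + ys.length

def get_friends_of_friends_alt (person_to_friends : List (String × List String)) (person : String) : List String :=
  let d := PySem.Dict.mk person_to_friends
  (d.getD person []).foldl (fun result mut_ =>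
      pvMerge result
        (PySem.List.sorted ((d.getD mut_ []).filter (fun f => decide (f ≠ person))) (fun x => x) false))
    []

-- ===== PRECONDITION & SPEC =====
-- Pre_ excludes exactly the KeyError inputs of A: person must be a key, and so must every friend of person
-- (B indexes identically and raises there too).
def Pre_get_friends_of_friends (person_to_friends : List (String × List String)) (person : String) : Prop :=
  (PySem.Dict.mk person_to_friends).contains person = true ∧
  ∀ m ∈ (PySem.Dict.mk person_to_friends).getD person [], (PySem.Dict.mk person_to_friends).contains m = true
instance (person_to_friends : List (String × List String)) (person : String) : Decidable (Pre_get_friends_of_friends person_to_friends person) := by unfold Pre_get_friends_of_friends; infer_instance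
def pvWitness_get_friends_of_friends : (List (String × List String)) × String :=
  ([("a", ["b", "b"]), ("b", ["a", "c", "c"])], "a")

def Spec_get_friends_of_friends (person_to_friends : List (String × List String)) (person : String) (out : List String) : Prop := out = get_friends_of_friends_alt person_to_friends person
instance (person_to_friends : List (String × List String)) (person : String) (out : List String) : Decidable (Spec_get_friends_of_friends person_to_friends person out) := by unfold Spec_get_friends_of_friends; infer_instance

-- ===== CLAIM (what is proved, stated in full; the proofs are below) =====
def Claim_equal_get_friends_of_friends : Prop := ∀ (person_to_friends : List (String × List String)) (person : String), Dom_get_friends_of_friends person_to_friends person → Pre_get_friends_of_friends person_to_friends person → Spec_get_friends_of_friends person_to_friends person (get_friends_of_friends person_to_friends person)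

-- ===== LEMMAS AND PROOFS =====

theorem pvMerge_perm (xs ys : List String) : (pvMerge xs ys).Perm (xs ++ ys) := by
  fun_induction pvMerge xs ys with
  | case1 ys => simp
  | case2 x xs => simp
  | case3 x xs y ys h ih =>
    simpa using ih.cons x
  | case4 x xs y ys h ih =>
    exact (ih.cons y).trans List.perm_middle.symm

theorem mem_pvMerge {z : String} {xs ys : List String} (h : z ∈ pvMerge xs ys) :
    z ∈ xs ∨ z ∈ ys := by
  have := (pvMerge_perm xs ys).mem_iff.mp h
  simpa using this

theorem pvMerge_pairwise {xs ys : List String}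
    (hx : xs.Pairwise (· ≤ ·)) (hy : ys.Pairwise (· ≤ ·)) :
    (pvMerge xs ys).Pairwise (· ≤ ·) := by
  fun_induction pvMerge xs ys with
  | case1 ys => exact hy
  | case2 x xs => exact hx
  | case3 x xs y ys h ih =>
    rcases List.pairwise_cons.mp hx with ⟨hxall, hx'⟩
    refine List.pairwise_cons.mpr ⟨?_, ih hx' hy⟩
    intro z hz
    rcases mem_pvMerge hz with hzx | hzy
    · exact hxall z hzx
    · rcases hzy with _ | hzy
      · exact h
      · exact le_trans h ((List.pairwise_cons.mp hy).1 z (by assumption))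
  | case4 x xs y ys h ih =>
    rcases List.pairwise_cons.mp hy with ⟨hyall, hy'⟩
    have hyx : y ≤ x := le_of_lt (lt_of_not_ge h)
    refine List.pairwise_cons.mpr ⟨?_, ih hx hy'⟩
    intro z hz
    rcases mem_pvMerge hz with hzx | hzy
    · rcases hzx with _ | hzx
      · exact hyx
      · exact le_trans hyx ((List.pairwise_cons.mp hx).1 z (by assumption))
    · exact hyall z hzy

-- folding pvMerge over sorted blocks keeps the accumulator sorted and a permutation of the concatenation
theorem foldl_pvMerge (blocks : List (List String)) (acc : List String)
    (hacc : acc.Pairwise (· ≤ ·)) (hb : ∀ b ∈ blocks, b.Pairwise (· ≤ ·)) :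
    (blocks.foldl pvMerge acc).Pairwise (· ≤ ·) ∧
    (blocks.foldl pvMerge acc).Perm (acc ++ blocks.flatten) := by
  induction blocks generalizing acc with
  | nil => simpa using hacc
  | cons b t ih =>
    have hb0 : b.Pairwise (· ≤ ·) := hb b (by simp)
    have ih' := ih (pvMerge acc b) (pvMerge_pairwise hacc hb0)
      (fun c hc => hb c (by simp [hc]))
    refine ⟨ih'.1, ?_⟩
    have hp := (pvMerge_perm acc b).append_right t.flatten
    simpa [List.append_assoc] using ih'.2.trans hp

theorem a_eq_sorted (person_to_friends : List (String × List String)) (person : String) :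
    get_friends_of_friends person_to_friends person
      = PySem.List.sorted
          ((((PySem.Dict.mk person_to_friends).getD person []).flatMap
            (fun m => ((PySem.Dict.mk person_to_friends).getD m []).filter (fun f => decide (f ≠ person)))))
          (fun x => x) false := by
  unfold get_friends_of_friends
  dsimp only
  set d := PySem.Dict.mk person_to_friends with hd
  have h1 : ∀ (acc : List String) (m : String), m ∈ d.getD person [] →
      ((d.getD m []).foldl (fun lst friend =>
        if friend ≠ person then lst ++ [friend] else lst) acc)
      = acc ++ (d.getD m []).filter (fun f => decide (f ≠ person)) := by
    intro acc m _
    exact PySem.List.foldl_append_ite_eq_filter _ _ _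
  rw [PySem.List.foldl_congr_mem _ _ _ _ h1, PySem.List.foldl_append_eq_flatMap, List.nil_append]

theorem get_friends_of_friends_spec' (person_to_friends : List (String × List String)) (person : String) :
    get_friends_of_friends person_to_friends person = get_friends_of_friends_alt person_to_friends person := by
  rw [a_eq_sorted]
  unfold get_friends_of_friends_alt
  dsimp only
  set d := PySem.Dict.mk person_to_friends with hd
  set g : String → List String := fun m =>
    PySem.List.sorted ((d.getD m []).filter (fun f => decide (f ≠ person))) (fun x => x) false with hg
  have hB : ((d.getD person []).foldl (fun result mut_ => pvMerge result (g mut_)) [])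
      = ((d.getD person []).map g).foldl pvMerge [] := by
    rw [List.foldl_map]
  have hblocks : ∀ b ∈ (d.getD person []).map g, b.Pairwise (· ≤ ·) := by
    intro b hb
    rcases List.mem_map.mp hb with ⟨m, _, rfl⟩
    exact PySem.List.sorted_pairwise ((d.getD m []).filter (fun f => decide (f ≠ person))) (fun x => x)
  have hfold := foldl_pvMerge ((d.getD person []).map g) [] (by simp) hblocks
  have hflat : (((d.getD person []).map g).flatten).Perm
      ((d.getD person []).flatMap (fun m => (d.getD m []).filter (fun f => decide (f ≠ person)))) := by
    rw [List.flatMap_def]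
    induction d.getD person [] with
    | nil => simp
    | cons m t ih =>
      simp only [List.map_cons, List.flatten_cons]
      exact (PySem.List.sorted_perm _ _ _).append ih
  rw [hB]
  apply PySem.List.sorted_id_eq_of_perm_of_pairwise
  · exact (hfold.2.trans (by simpa using hflat))
  · exact hfold.1

-- ===== VERDICT (by name: the statement is the Claim_ definition above) =====
theorem get_friends_of_friends_spec : Claim_equal_get_friends_of_friends := by
  intro ptf person _ _
  unfold Spec_get_friends_of_friends
  exact get_friends_of_friends_spec' ptf person
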